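-- pv_equiv track=rewrite | github.com/EcoFriendlyAppleSu/algo | level01/성격유형검사하기.py | solution
-- ===== SOURCE A (Python) =====
-- def solution(survey, choices):
--     score = [3, 2, 1, 0, 1, 2, 3]
--     personality = {"R": 0, "T": 0, "C": 0, "F": 0, "J": 0, "M": 0, "A": 0,
--                    "N": 0}
--     answer = ""
--
--     # 1000
--     for index in range(len(survey)):
--         left, right = survey[index][0], survey[index][1]
--         choice = choices[index]-1 # 가져올 값의 위치를 얻습니다.
--         choiceScore = score[choice] # 점수를 알 수 있습니다.
--         if choice == 3:
--             continue
--         if choice < 3: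
--             personality[left] += choiceScore
--             continue
--         if choice > 3:
--             personality[right] += choiceScore
--             continue
--
--     listPersonality = list(personality.items())
--
--     # 4
--     for i in range(0, len(listPersonality), 2):
--         if listPersonality[i][1] >= listPersonality[i+1][1]:
--             answer += listPersonality[i][0]
--             continue
--         answer += listPersonality[i+1][0]
--
--     return answer
-- ===== SOURCE B (Python) =====
-- PAIRS = ("RT", "CF", "JM", "AN")
-- WEIGHT = {1: 3, 2: 2, 3: 1, 5: 1, 6: 2, 7: 3}
--
--
-- def solution(survey, choices):
--     def total(letter):
--         return sum(WEIGHT[c] for pair, c in zip(survey, choices)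
--                    if c != 4 and (pair[0] if c < 4 else pair[1]) == letter)
--     return "".join(a if total(a) >= total(b) else b for a, b in PAIRS)
-- ===== Notes on version B (the rewrite author's own statement) =====
-- stated objective: simpler
-- what changed: Replaces A's single stateful pass over 8 dict counters followed by a pairwise item scan with a stateless staged formulation: for each pair, two filtered sums over the survey (one per letter) decide which member to emit; no counter state is maintained at all.
-- outside the precondition, e.g. on solution(['RT'], [0]): A returns 'RCJA', B raises KeyError
import Mathlib
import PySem

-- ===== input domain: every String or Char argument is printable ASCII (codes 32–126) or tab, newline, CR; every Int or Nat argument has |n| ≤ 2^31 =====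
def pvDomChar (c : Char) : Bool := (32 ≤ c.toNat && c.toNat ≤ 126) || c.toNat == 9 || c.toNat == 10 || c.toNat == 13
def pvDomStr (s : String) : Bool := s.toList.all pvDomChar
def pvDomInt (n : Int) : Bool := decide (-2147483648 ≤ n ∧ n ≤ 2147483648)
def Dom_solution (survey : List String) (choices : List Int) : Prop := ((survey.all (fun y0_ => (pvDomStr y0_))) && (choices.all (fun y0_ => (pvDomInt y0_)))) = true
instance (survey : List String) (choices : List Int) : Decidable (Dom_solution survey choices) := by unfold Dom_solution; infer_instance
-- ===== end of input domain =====

-- B replaces A's single stateful pass over 8 dict counters plus a pairwise item scan by a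
-- stateless formulation: for each pair, two filtered sums over the survey decide which letter
-- to emit; same O(n) cost (8 passes), simpler structure.


-- ===== PORT A =====
-- Literal port of A. Python's `personality[left] += v` raises KeyError on a missing key;
-- here Dict.modify is used, which agrees with it whenever the key is present (guaranteed by
-- Pre_solution). Strings are built on the List Char side per the PySem convention.
def solution (survey : List String) (choices : List Int) : String :=
  let score : List Int := [3, 2, 1, 0, 1, 2, 3]
  let personality : PySem.Dict Char Int :=
    ((((((((PySem.Dict.empty.insert 'R' 0).insert 'T' 0).insert 'C' 0).insert 'F' 0).insert
        'J' 0).insert 'M' 0).insert 'A' 0).insert 'N' 0)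
  let personality := (PySem.List.pyRange 0 (survey.length : Int) 1).foldl (fun pers index =>
    let s := (PySem.List.pyGet? survey index).getD ""
    let left := (PySem.Str.pyGet? s 0).getD ' '
    let right := (PySem.Str.pyGet? s 1).getD ' '
    let choice := (PySem.List.pyGet? choices index).getD 0 - 1
    let choiceScore := (PySem.List.pyGet? score choice).getD 0
    if choice == 3 then pers
    else if choice < 3 then pers.modify left 0 (· + choiceScore)
    else pers.modify right 0 (· + choiceScore)) personality
  let listPersonality := personality.items
  let answer := (PySem.List.pyRange 0 (listPersonality.length : Int) 2).foldl (fun ans i =>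
    let pi0 := (PySem.List.pyGet? listPersonality i).getD (' ', 0)
    let pi1 := (PySem.List.pyGet? listPersonality (i + 1)).getD (' ', 0)
    if pi0.2 ≥ pi1.2 then ans ++ [pi0.1] else ans ++ [pi1.1]) ([] : List Char)
  String.ofList answer

-- ===== PORT B =====
-- Port of Source B. Python's WEIGHT[c] raises KeyError on a missing key; get?/getD is used here,
-- which agrees whenever the key is present (guaranteed by Pre_solution). `sum(... for ... if cond)`
-- is ported as a foldl that adds when the condition holds.
def pairsB : List String := ["RT", "CF", "JM", "AN"]

def weightB : PySem.Dict Int Int :=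
  PySem.Dict.ofList [(1, 3), (2, 2), (3, 1), (5, 1), (6, 2), (7, 3)]

def solution_alt (survey : List String) (choices : List Int) : String :=
  let total : Char → Int := fun letter =>
    (survey.zip choices).foldl (fun s pc =>
      if pc.2 != 4 &&
         ((if pc.2 < 4 then (PySem.Str.pyGet? pc.1 0).getD ' '
           else (PySem.Str.pyGet? pc.1 1).getD ' ') == letter)
      then s + (weightB.get? pc.2).getD 0 else s) 0
  PySem.Str.join "" (pairsB.map (fun p =>
    let a := (PySem.Str.pyGet? p 0).getD ' '
    let b := (PySem.Str.pyGet? p 1).getD ' '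
    if total a ≥ total b then String.ofList [a] else String.ofList [b]))

-- ===== PRECONDITION & SPEC =====
def LettersP : List Char := ['R', 'T', 'C', 'F', 'J', 'M', 'A', 'N']

-- Pre_ excludes exactly the inputs where A raises (IndexError: choices shorter than survey,
-- a survey entry shorter than 2 chars, a choice outside [-6,7]; KeyError: credited letter not
-- one of the 8) plus the choices in [-6,0], where A returns via negative-index wraparound into
-- the score table while B raises KeyError on its WEIGHT table.
def Pre_solution (survey : List String) (choices : List Int) : Prop :=
  survey.length ≤ choices.length ∧
  ∀ p ∈ survey.zip choices,
    2 ≤ p.1.toList.length ∧ 1 ≤ p.2 ∧ p.2 ≤ 7 ∧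
    (p.2 < 4 → p.1.toList.getD 0 ' ' ∈ LettersP) ∧
    (4 < p.2 → p.1.toList.getD 1 ' ' ∈ LettersP)
instance (survey : List String) (choices : List Int) : Decidable (Pre_solution survey choices) := by
  unfold Pre_solution; infer_instance

def pvWitness_solution : List String × List Int :=
  (["AN", "CF", "MJ", "RT", "NA"], [5, 3, 2, 7, 4])

def Spec_solution (survey : List String) (choices : List Int) (out : String) : Prop :=
  out = solution_alt survey choices
instance (survey : List String) (choices : List Int) (out : String) : Decidable (Spec_solution survey choices out) := by
  unfold Spec_solution; infer_instance

-- ===== CLAIM (what is proved, stated in full; the proofs are below) =====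
def Claim_equal_solution : Prop := ∀ (survey : List String) (choices : List Int),
  Dom_solution survey choices → Pre_solution survey choices →
  Spec_solution survey choices (solution survey choices)

-- ===== LEMMAS AND PROOFS =====

-- proof-side views (definitionally equal to the corresponding pieces of the ports)
def mk8 (r t c f j m a n : Int) : PySem.Dict Char Int :=
  PySem.Dict.mk [('R', r), ('T', t), ('C', c), ('F', f), ('J', j), ('M', m), ('A', a), ('N', n)]

def fAz (pers : PySem.Dict Char Int) (s : String) (cc : Int) : PySem.Dict Char Int :=
  let left := (PySem.Str.pyGet? s 0).getD ' '
  let right := (PySem.Str.pyGet? s 1).getD ' '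
  let choice := cc - 1
  let choiceScore := (PySem.List.pyGet? [3, 2, 1, 0, 1, 2, 3] choice).getD 0
  if choice == 3 then pers
  else if choice < 3 then pers.modify left 0 (· + choiceScore)
  else pers.modify right 0 (· + choiceScore)

def finA (d : PySem.Dict Char Int) : String :=
  String.ofList ((PySem.List.pyRange 0 (d.items.length : Int) 2).foldl (fun ans i =>
    let pi0 := (PySem.List.pyGet? d.items i).getD (' ', 0)
    let pi1 := (PySem.List.pyGet? d.items (i + 1)).getD (' ', 0)
    if pi0.2 >= pi1.2 then ans ++ [pi0.1] else ans ++ [pi1.1]) ([] : List Char))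

def wB (c : Int) : Int := (weightB.get? c).getD 0

def predB (letter : Char) (pc : String × Int) : Bool :=
  pc.2 != 4 &&
    ((if pc.2 < 4 then (PySem.Str.pyGet? pc.1 0).getD ' '
      else (PySem.Str.pyGet? pc.1 1).getD ' ') == letter)

def totB (l : List (String × Int)) (letter : Char) : Int :=
  l.foldl (fun s pc => if predB letter pc then s + wB pc.2 else s) 0

def GoodP (p : String × Int) : Prop :=
  2 <= p.1.toList.length ∧ 1 <= p.2 ∧ p.2 <= 7 ∧
  (p.2 < 4 → p.1.toList.getD 0 ' ' ∈ LettersP) ∧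
  (4 < p.2 → p.1.toList.getD 1 ' ' ∈ LettersP)

lemma pyGet?_succ_shift {α : Type} (z : α) (zs : List α) (i : Int) (hi : 0 <= i) :
    PySem.List.pyGet? (z :: zs) (i + 1) = PySem.List.pyGet? zs i := by
  have h : i = ((i.toNat : Nat) : Int) := (Int.toNat_of_nonneg hi).symm
  rw [h, PySem.List.pyGet?_cons_succ]

lemma zipfold {σ : Type} (f : σ → String → Int → σ) :
    ∀ (xs : List String) (ys : List Int) (init : σ), xs.length <= ys.length →
    (PySem.List.pyRange 0 (xs.length : Int) 1).foldl
        (fun st i => f st ((PySem.List.pyGet? xs i).getD "") ((PySem.List.pyGet? ys i).getD 0)) init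
    = (xs.zip ys).foldl (fun st p => f st p.1 p.2) init := by
  intro xs
  induction xs with
  | nil => intro ys init h; simp [PySem.List.pyRange_one_eq_nil]
  | cons x xs ih =>
    intro ys init h
    cases ys with
    | nil => simp at h
    | cons y ys =>
      rw [PySem.List.pyRange_one_cons (by exact_mod_cast Nat.succ_pos xs.length)]
      simp only [List.foldl_cons, List.zip_cons_cons]
      rw [show ((PySem.List.pyGet? (x :: xs) 0).getD "") = x from by
            rw [PySem.List.pyGet?_zero_cons]; rfl]
      rw [show ((PySem.List.pyGet? (y :: ys) 0).getD 0) = y from by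
            rw [PySem.List.pyGet?_zero_cons]; rfl]
      have hshift : PySem.List.pyRange (0 + 1) (((x :: xs).length : Int)) 1
          = (PySem.List.pyRange 0 ((xs.length : Int)) 1).map (· + 1) := by
        rw [PySem.List.pyRange_one, PySem.List.pyRange_one, List.map_map]
        have hlen : (((x :: xs).length : Int) - (0 + 1)).toNat = ((xs.length : Int) - 0).toNat := by
          simp
        rw [hlen]
        apply List.map_congr_left
        intro k hk
        simp; omega
      rw [hshift, List.foldl_map]
      rw [PySem.List.foldl_congr_mem _ _
        (fun st i => f st ((PySem.List.pyGet? xs i).getD "") ((PySem.List.pyGet? ys i).getD 0)) _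
        (by
          intro st i hi
          rw [PySem.List.mem_pyRange_one] at hi
          rw [pyGet?_succ_shift x xs i hi.1, pyGet?_succ_shift y ys i hi.1])]
      exact ih ys _ (by simpa using h)

lemma weight_eq (cc : Int) (h1 : 1 <= cc) (h7 : cc <= 7) :
    wB cc = (PySem.List.pyGet? [3, 2, 1, 0, 1, 2, 3] (cc - 1)).getD 0 := by
  interval_cases cc <;> decide

lemma totB_cons (p : String × Int) (l : List (String × Int)) (L : Char) :
    totB (p :: l) L = (if predB L p then wB p.2 else 0) + totB l L := by
  unfold totB
  rw [List.foldl_cons]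
  have hstep : ∀ (a : Int),
      l.foldl (fun s pc => if predB L pc then s + wB pc.2 else s) a
      = a + l.foldl (fun s pc => if predB L pc then s + wB pc.2 else s) 0 := by
    intro a
    have hfun : (fun (s : Int) (pc : String × Int) => if predB L pc then s + wB pc.2 else s)
        = (fun (s : Int) (pc : String × Int) => s + (if predB L pc then wB pc.2 else 0)) := by
      funext s pc; split_ifs <;> omega
    rw [hfun, PySem.List.foldl_add, PySem.List.foldl_add]
    omega
  rw [hstep, hstep 0]
  split_ifs <;> omega

lemma step_corr (p : String × Int) (hp : GoodP p) (r t c f j m a n : Int) :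
    fAz (mk8 r t c f j m a n) p.1 p.2
    = mk8 (r + if predB 'R' p then wB p.2 else 0) (t + if predB 'T' p then wB p.2 else 0)
          (c + if predB 'C' p then wB p.2 else 0) (f + if predB 'F' p then wB p.2 else 0)
          (j + if predB 'J' p then wB p.2 else 0) (m + if predB 'M' p then wB p.2 else 0)
          (a + if predB 'A' p then wB p.2 else 0) (n + if predB 'N' p then wB p.2 else 0) := by
  obtain ⟨hlen, h1, h7, hL, hR⟩ := hp
  by_cases h4 : p.2 = 4
  · simp [fAz, predB, h4, mk8]
  · have e3 : (p.2 - 1 == 3) = false := beq_eq_false_iff_ne.mpr (by omega)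
    have e4 : (p.2 != 4) = true := by simp [h4]
    by_cases hlt : p.2 < 4
    · have hchar : (PySem.Str.pyGet? p.1 0).getD ' ' = p.1.toList.getD 0 ' ' := by
        simp [pysem, List.getD_eq_getElem?_getD]
      have hlt' : p.2 - 1 < 3 := by omega
      have hl8 := hL hlt
      simp only [LettersP, List.mem_cons, List.not_mem_nil, or_false] at hl8
      simp only [fAz, e3, Bool.false_eq_true, if_false, if_pos hlt', ← weight_eq p.2 h1 h7, hchar]
      rcases hl8 with h | h | h | h | h | h | h | h <;>
        · rw [h]
          simp only [predB, e4, Bool.true_and, if_pos hlt, hchar, h]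
          simp [mk8, PySem.Dict.modify, PySem.Dict.insert, PySem.Dict.getD, PySem.Dict.get?]
    · have hgt : 4 < p.2 := by omega
      have hchar : (PySem.Str.pyGet? p.1 1).getD ' ' = p.1.toList.getD 1 ' ' := by
        simp [pysem, List.getD_eq_getElem?_getD]
      have hge' : ¬ (p.2 - 1 < 3) := by omega
      have hl8 := hR hgt
      simp only [LettersP, List.mem_cons, List.not_mem_nil, or_false] at hl8
      simp only [fAz, e3, Bool.false_eq_true, if_false, if_neg hge', ← weight_eq p.2 h1 h7, hchar]
      rcases hl8 with h | h | h | h | h | h | h | h <;>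
        · rw [h]
          simp only [predB, e4, Bool.true_and, if_neg hlt, hchar, h]
          simp [mk8, PySem.Dict.modify, PySem.Dict.insert, PySem.Dict.getD, PySem.Dict.get?]

lemma foldA_eq (l : List (String × Int)) (hg : ∀ p ∈ l, GoodP p) :
    ∀ r t c f j m a n : Int,
      l.foldl (fun st p => fAz st p.1 p.2) (mk8 r t c f j m a n)
      = mk8 (r + totB l 'R') (t + totB l 'T') (c + totB l 'C') (f + totB l 'F')
            (j + totB l 'J') (m + totB l 'M') (a + totB l 'A') (n + totB l 'N') := by
  induction l with
  | nil => intro r t c f j m a n; simp [totB]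
  | cons p l ih =>
    intro r t c f j m a n
    rw [List.foldl_cons, step_corr p (hg p (List.mem_cons_self ..)),
        ih (fun q hq => hg q (List.mem_cons_of_mem _ hq))]
    simp only [totB_cons]
    simp [mk8, Int.add_assoc]

set_option maxHeartbeats 1000000 in
lemma fin_eq (r t c f j m a n : Int) :
    finA (mk8 r t c f j m a n)
    = PySem.Str.join "" [(if r ≥ t then "R" else "T"), (if c ≥ f then "C" else "F"),
        (if j ≥ m then "J" else "M"), (if a ≥ n then "A" else "N")] := by
  unfold finA mk8
  rw [show ((PySem.Dict.mk [('R', r), ('T', t), ('C', c), ('F', f), ('J', j), ('M', m), ('A', a), ('N', n)]).items.length : Int) = 8 from by rfl]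
  rw [show PySem.List.pyRange 0 8 2 = [0, 2, 4, 6] from by decide]
  simp [PySem.List.pyGet?, PySem.List.pyIdx?]
  split_ifs <;> rfl

-- ===== VERDICT (by name: the statement is the Claim_ definition above) =====
theorem solution_spec : Claim_equal_solution := by
  intro survey choices _ hpre
  obtain ⟨hlen, hgood⟩ := hpre
  show solution survey choices = solution_alt survey choices
  have hA : solution survey choices
      = finA ((PySem.List.pyRange 0 ((survey.length : Int)) 1).foldl
          (fun st i => fAz st ((PySem.List.pyGet? survey i).getD "")
            ((PySem.List.pyGet? choices i).getD 0)) (mk8 0 0 0 0 0 0 0 0)) := rfl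
  have hB : solution_alt survey choices
      = PySem.Str.join "" [(if totB (survey.zip choices) 'R' ≥ totB (survey.zip choices) 'T' then "R" else "T"),
          (if totB (survey.zip choices) 'C' ≥ totB (survey.zip choices) 'F' then "C" else "F"),
          (if totB (survey.zip choices) 'J' ≥ totB (survey.zip choices) 'M' then "J" else "M"),
          (if totB (survey.zip choices) 'A' ≥ totB (survey.zip choices) 'N' then "A" else "N")] := by
    unfold solution_alt pairsB
    simp only [List.map_cons, List.map_nil]
    rfl
  rw [hA, hB, zipfold fAz survey choices _ hlen,
      foldA_eq (survey.zip choices) (fun p hp => hgood p hp), fin_eq]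
  simp
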